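-- pv_equiv track=rewrite | github.com/Divyendra-S/Karen | jd-generator/core/graph/nodes/question.py | _get_skills_question
-- ===== SOURCE A (Python) =====
-- from typing import Dict, Any, List, Optional
--
-- def _get_skills_question(job_data: Dict[str, Any]) -> str:
--     """Generate contextual skills question."""
--     job_title = job_data.get("job_title", "").lower()
--
--     if any(
--         tech_word in job_title
--         for tech_word in ["engineer", "developer", "programmer", "analyst"]
--     ):
--         return (
--             "What are your technical and soft skills? Please provide SPECIFIC lists:\n"
--             "• Programming languages: List each one (e.g., Python, JavaScript, Java, SQL)\n"
--             "• Frameworks/tools: List each one (e.g., React, Django, AWS, Docker)\n"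
--             "• Technical skills: List each one (e.g., System Design, API Development, Testing)\n"
--             "• Soft skills: List each one (e.g., Communication, Problem-solving, Leadership)\n"
--             "• Certifications: List any you have (e.g., AWS Certified, Scrum Master)\n"
--             "Format: Separate each skill with commas within each category."
--         )
--     elif "marketing" in job_title:
--         return (
--             "What are your marketing skills and expertise? Please provide SPECIFIC lists:\n"
--             "• Marketing tools: List each one (e.g., Google Analytics, HubSpot, Salesforce)\n"
--             "• Technical skills: List each one (e.g., SEO, PPC, Email Marketing, Content Strategy)\n"
--             "• Soft skills: List each one (e.g., Communication, Creativity, Analytical Thinking)\n"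
--             "• Certifications: List any you have (e.g., Google Ads, Facebook Blueprint)\n"
--             "Format: Separate each skill with commas within each category."
--         )
--     elif "sales" in job_title:
--         return (
--             "What are your sales skills and experience? Please provide SPECIFIC lists:\n"
--             "• Sales tools: List each one (e.g., Salesforce, HubSpot, Outreach)\n"
--             "• Sales skills: List each one (e.g., Cold Calling, Negotiation, Account Management)\n"
--             "• Soft skills: List each one (e.g., Communication, Relationship Building, Persistence)\n"
--             "• Certifications: List any you have (e.g., Salesforce Certified, Sales methodology training)\n"
--             "Format: Separate each skill with commas within each category."
--         )
--     else:
--         return (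
--             "What are your key skills and expertise? Please provide SPECIFIC lists:\n"
--             "• Technical skills: List tools, software, methods you know\n"
--             "• Soft skills: List interpersonal and cognitive abilities\n"
--             "• Certifications: List any professional certifications\n"
--             "• Specialized knowledge: List domain expertise areas\n"
--             "Format: Separate each skill with commas within each category."
--         )
-- ===== SOURCE B (Python) =====
-- # Different mechanism: keyword->priority map; collect priorities of ALL matched
-- # keywords, then index the message array by the MINIMUM matched priority
-- # (3 if nothing matched).  min over categories = A's first firing branch.
-- _MESSAGES = [
--     (
--         "What are your technical and soft skills? Please provide SPECIFIC lists:\n"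
--         "• Programming languages: List each one (e.g., Python, JavaScript, Java, SQL)\n"
--         "• Frameworks/tools: List each one (e.g., React, Django, AWS, Docker)\n"
--         "• Technical skills: List each one (e.g., System Design, API Development, Testing)\n"
--         "• Soft skills: List each one (e.g., Communication, Problem-solving, Leadership)\n"
--         "• Certifications: List any you have (e.g., AWS Certified, Scrum Master)\n"
--         "Format: Separate each skill with commas within each category."
--     ),
--     (
--         "What are your marketing skills and expertise? Please provide SPECIFIC lists:\n"
--         "• Marketing tools: List each one (e.g., Google Analytics, HubSpot, Salesforce)\n"
--         "• Technical skills: List each one (e.g., SEO, PPC, Email Marketing, Content Strategy)\n"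
--         "• Soft skills: List each one (e.g., Communication, Creativity, Analytical Thinking)\n"
--         "• Certifications: List any you have (e.g., Google Ads, Facebook Blueprint)\n"
--         "Format: Separate each skill with commas within each category."
--     ),
--     (
--         "What are your sales skills and experience? Please provide SPECIFIC lists:\n"
--         "• Sales tools: List each one (e.g., Salesforce, HubSpot, Outreach)\n"
--         "• Sales skills: List each one (e.g., Cold Calling, Negotiation, Account Management)\n"
--         "• Soft skills: List each one (e.g., Communication, Relationship Building, Persistence)\n"
--         "• Certifications: List any you have (e.g., Salesforce Certified, Sales methodology training)\n"
--         "Format: Separate each skill with commas within each category."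
--     ),
--     (
--         "What are your key skills and expertise? Please provide SPECIFIC lists:\n"
--         "• Technical skills: List tools, software, methods you know\n"
--         "• Soft skills: List interpersonal and cognitive abilities\n"
--         "• Certifications: List any professional certifications\n"
--         "• Specialized knowledge: List domain expertise areas\n"
--         "Format: Separate each skill with commas within each category."
--     ),
-- ]
--
-- _KEYWORD_PRIORITY = {
--     "engineer": 0,
--     "developer": 0,
--     "programmer": 0,
--     "analyst": 0,
--     "marketing": 1,
--     "sales": 2,
-- }
--
-- def _get_skills_question(job_data):
--     job_title = job_data.get("job_title", "").lower()
--     matched = [p for kw, p in _KEYWORD_PRIORITY.items() if kw in job_title]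
--     return _MESSAGES[min(matched) if matched else 3]
-- ===== Notes on version B (the rewrite author's own statement) =====
-- stated objective: alternative
-- what changed: Replaced the ordered if/elif substring chain by a keyword-to-priority map: B collects the priorities of all keywords occurring in the title and indexes a message array by the minimum matched priority (3 when nothing matches).
import Mathlib
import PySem

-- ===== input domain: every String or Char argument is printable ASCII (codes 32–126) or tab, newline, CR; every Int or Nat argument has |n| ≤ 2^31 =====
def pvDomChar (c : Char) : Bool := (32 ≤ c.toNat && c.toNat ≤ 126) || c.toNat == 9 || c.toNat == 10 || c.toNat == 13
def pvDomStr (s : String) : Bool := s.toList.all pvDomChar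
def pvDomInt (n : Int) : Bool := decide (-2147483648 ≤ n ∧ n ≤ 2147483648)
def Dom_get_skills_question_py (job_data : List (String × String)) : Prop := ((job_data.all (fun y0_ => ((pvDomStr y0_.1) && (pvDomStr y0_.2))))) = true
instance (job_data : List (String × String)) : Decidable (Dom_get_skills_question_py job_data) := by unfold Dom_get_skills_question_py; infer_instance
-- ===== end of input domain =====

-- B replaces A's ordered if/elif chain by a keyword→priority map: it collects the
-- priorities of ALL keywords contained in the title and indexes a message array by the
-- minimum matched priority (objective: alternative).

-- the four message strings (shared literals; both Pythons contain them verbatim)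
def pvTechMsg : String :=
  "What are your technical and soft skills? Please provide SPECIFIC lists:\n• Programming languages: List each one (e.g., Python, JavaScript, Java, SQL)\n• Frameworks/tools: List each one (e.g., React, Django, AWS, Docker)\n• Technical skills: List each one (e.g., System Design, API Development, Testing)\n• Soft skills: List each one (e.g., Communication, Problem-solving, Leadership)\n• Certifications: List any you have (e.g., AWS Certified, Scrum Master)\nFormat: Separate each skill with commas within each category."
def pvMarketingMsg : String :=
  "What are your marketing skills and expertise? Please provide SPECIFIC lists:\n• Marketing tools: List each one (e.g., Google Analytics, HubSpot, Salesforce)\n• Technical skills: List each one (e.g., SEO, PPC, Email Marketing, Content Strategy)\n• Soft skills: List each one (e.g., Communication, Creativity, Analytical Thinking)\n• Certifications: List any you have (e.g., Google Ads, Facebook Blueprint)\nFormat: Separate each skill with commas within each category."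
def pvSalesMsg : String :=
  "What are your sales skills and experience? Please provide SPECIFIC lists:\n• Sales tools: List each one (e.g., Salesforce, HubSpot, Outreach)\n• Sales skills: List each one (e.g., Cold Calling, Negotiation, Account Management)\n• Soft skills: List each one (e.g., Communication, Relationship Building, Persistence)\n• Certifications: List any you have (e.g., Salesforce Certified, Sales methodology training)\nFormat: Separate each skill with commas within each category."
def pvDefaultMsg : String :=
  "What are your key skills and expertise? Please provide SPECIFIC lists:\n• Technical skills: List tools, software, methods you know\n• Soft skills: List interpersonal and cognitive abilities\n• Certifications: List any professional certifications\n• Specialized knowledge: List domain expertise areas\nFormat: Separate each skill with commas within each category."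

-- ===== PORT A =====
def get_skills_question_py (job_data : List (String × String)) : String :=
  let job_title := PySem.Str.lower (PySem.Dict.getD (PySem.Dict.mk job_data) "job_title" "")
  if ["engineer", "developer", "programmer", "analyst"].any
      (fun tech_word => PySem.Str.isIn tech_word job_title) then
    pvTechMsg
  else if PySem.Str.isIn "marketing" job_title then
    pvMarketingMsg
  else if PySem.Str.isIn "sales" job_title then
    pvSalesMsg
  else
    pvDefaultMsg

-- ===== PORT B =====
def pvMessages : List String := [pvTechMsg, pvMarketingMsg, pvSalesMsg, pvDefaultMsg]

def pvKeywordPriority : List (String × Nat) :=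
  [("engineer", 0), ("developer", 0), ("programmer", 0), ("analyst", 0),
   ("marketing", 1), ("sales", 2)]

def get_skills_question_py_alt (job_data : List (String × String)) : String :=
  let job_title := PySem.Str.lower (PySem.Dict.getD (PySem.Dict.mk job_data) "job_title" "")
  let matched := (pvKeywordPriority.filter (fun p => PySem.Str.isIn p.1 job_title)).map Prod.snd
  pvMessages.getD (match matched.min? with | some m => m | none => 3) pvDefaultMsg

-- ===== PRECONDITION & SPEC =====
def Spec_get_skills_question_py (job_data : List (String × String)) (out : String) : Prop := out = get_skills_question_py_alt job_data
instance (job_data : List (String × String)) (out : String) : Decidable (Spec_get_skills_question_py job_data out) := by unfold Spec_get_skills_question_py; infer_instance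

-- ===== CLAIM (what is proved, stated in full; the proofs are below) =====
def Claim_equal_get_skills_question_py : Prop := ∀ (job_data : List (String × String)), Dom_get_skills_question_py job_data → Spec_get_skills_question_py job_data (get_skills_question_py job_data)

-- ===== LEMMAS AND PROOFS =====

-- for any title, the minimum-matched-priority lookup equals A's branch chain
theorem pvMinPriority_eq_chain (jt : String) :
    pvMessages.getD
      (match ((pvKeywordPriority.filter (fun p => PySem.Str.isIn p.1 jt)).map Prod.snd).min? with
       | some m => m | none => 3) pvDefaultMsg =
      if ["engineer", "developer", "programmer", "analyst"].any
          (fun w => PySem.Str.isIn w jt) then pvTechMsg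
      else if PySem.Str.isIn "marketing" jt then pvMarketingMsg
      else if PySem.Str.isIn "sales" jt then pvSalesMsg
      else pvDefaultMsg := by
  have e1 : ("engineer" : String).toList = ['e','n','g','i','n','e','e','r'] := rfl
  have e2 : ("developer" : String).toList = ['d','e','v','e','l','o','p','e','r'] := rfl
  have e3 : ("programmer" : String).toList = ['p','r','o','g','r','a','m','m','e','r'] := rfl
  have e4 : ("analyst" : String).toList = ['a','n','a','l','y','s','t'] := rfl
  have e5 : ("marketing" : String).toList = ['m','a','r','k','e','t','i','n','g'] := rfl
  have e6 : ("sales" : String).toList = ['s','a','l','e','s'] := rfl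
  simp only [pvKeywordPriority, pvMessages, List.filter, PySem.Str.isIn, e1, e2, e3, e4, e5, e6]
  cases h1 : PySem.Chars.isIn ['e','n','g','i','n','e','e','r'] jt.toList <;>
  cases h2 : PySem.Chars.isIn ['d','e','v','e','l','o','p','e','r'] jt.toList <;>
  cases h3 : PySem.Chars.isIn ['p','r','o','g','r','a','m','m','e','r'] jt.toList <;>
  cases h4 : PySem.Chars.isIn ['a','n','a','l','y','s','t'] jt.toList <;>
  cases h5 : PySem.Chars.isIn ['m','a','r','k','e','t','i','n','g'] jt.toList <;>
  cases h6 : PySem.Chars.isIn ['s','a','l','e','s'] jt.toList <;>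
  simp [h1, h2, h3, h4, h5, h6, List.min?]

-- ===== VERDICT (by name: the statement is the Claim_ definition above) =====
theorem get_skills_question_py_spec : Claim_equal_get_skills_question_py := by
  intro job_data _
  unfold Spec_get_skills_question_py get_skills_question_py get_skills_question_py_alt
  rw [pvMinPriority_eq_chain]
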